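-- pv_equiv track=rewrite | github.com/anty-filidor/network_diffusion | network_diffusion/models/utils/compartmental.py | _int_to_bins
-- ===== SOURCE A (Python) =====
-- from typing import Any, Dict, List, Optional, Tuple
--
-- def _int_to_bins(bins: Tuple[int, ...], base_num: int) -> List[int]:
--     binned_number: List[int] = []
--     for idx, percentage in enumerate(bins, 1):
--         size_of_bin = int(percentage * base_num / 100)
--         while sum(binned_number) + size_of_bin > base_num:
--             size_of_bin -= 1
--         if idx == len(bins):
--             while sum(binned_number) + size_of_bin < base_num:
--                 size_of_bin += 1
--         binned_number.append(size_of_bin)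
--
--     return binned_number
-- ===== SOURCE B (Python) =====
-- def _int_to_bins(bins, base_num):
--     result = []
--     total = 0
--     for percentage in bins[:-1]:
--         size = min(int(percentage * base_num / 100), base_num - total)
--         total += size
--         result.append(size)
--     if bins:
--         result.append(base_num - total)
--     return result
-- ===== Notes on version B (the rewrite author's own statement) =====
-- stated objective: faster
-- what changed: Replace A's per-bin recomputed sum(binned_number) and unit-step decrement/increment while loops by a single pass keeping a running total, with size = min(int(p*base_num/100), base_num - total) per bin and the last bin assigned base_num - total directly.
import Mathlib
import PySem

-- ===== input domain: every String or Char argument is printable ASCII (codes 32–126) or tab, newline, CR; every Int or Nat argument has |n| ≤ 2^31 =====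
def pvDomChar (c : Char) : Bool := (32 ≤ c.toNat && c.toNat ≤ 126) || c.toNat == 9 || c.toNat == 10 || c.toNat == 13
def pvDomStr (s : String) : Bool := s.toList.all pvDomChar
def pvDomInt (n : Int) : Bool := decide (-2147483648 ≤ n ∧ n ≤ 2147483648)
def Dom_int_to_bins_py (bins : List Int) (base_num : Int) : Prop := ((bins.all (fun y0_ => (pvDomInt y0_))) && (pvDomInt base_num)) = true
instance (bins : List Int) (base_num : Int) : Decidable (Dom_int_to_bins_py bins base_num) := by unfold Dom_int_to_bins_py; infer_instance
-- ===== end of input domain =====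

-- B replaces A's repeated `sum(...)` and unit-step while loops by one running total
-- with a direct min / final assignment per bin (objective: faster, O(n) vs O(n·(n+|base_num|))).

-- ===== PORT A =====
-- Hand model of Python's `int(x / 100)` (IEEE-754 double division, round-to-nearest-even,
-- then truncation): exact for every |x| ≤ 2^62 (both Pythons' `int(percentage * base_num / 100)`
-- goes through this one float expression, so both ports share this helper).
-- round-half-even of num/den (num ≥ 0, den > 0)
def pvNearestEven (num den : Int) : Int :=
  let q := num / den
  let r := num % den
  if 2 * r > den ∨ (2 * r = den ∧ q % 2 = 1) then q + 1 else q

def pvIntDivFloat100 (x : Int) : Int :=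
  let s : Int := if x < 0 then -1 else 1
  let X := x.natAbs
  if X < 100 then 0
  else
    let t := Nat.log2 (X / 100)        -- floor(log2(|x|/100)), i.e. the double's exponent
    if 52 ≤ t then
      let e : Nat := t - 52
      s * (pvNearestEven (X : Int) (100 * 2 ^ e) * 2 ^ e)
    else
      let e : Nat := 52 - t
      s * (pvNearestEven ((X : Int) * 2 ^ e) 100 / 2 ^ e)

-- `while sum(binned_number) + size_of_bin > base_num: size_of_bin -= 1`
-- (fuel = the number of decrements the loop can still make; it only bounds the recursion)
def pvWhileDecGo (fuel : Nat) (binSum size base : Int) : Int :=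
  match fuel with
  | 0 => size
  | k + 1 => if binSum + size > base then pvWhileDecGo k binSum (size - 1) base else size

def pvWhileDec (binSum size base : Int) : Int :=
  pvWhileDecGo (binSum + size - base).toNat binSum size base

-- `while sum(binned_number) + size_of_bin < base_num: size_of_bin += 1`
def pvWhileIncGo (fuel : Nat) (binSum size base : Int) : Int :=
  match fuel with
  | 0 => size
  | k + 1 => if binSum + size < base then pvWhileIncGo k binSum (size + 1) base else size

def pvWhileInc (binSum size base : Int) : Int :=
  pvWhileIncGo (base - binSum - size).toNat binSum size base

-- the `for idx, percentage in enumerate(bins, 1)` loop, carrying idx and the list built so far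
def pvALoop (bins : List Int) (base idx n : Int) (binned : List Int) : List Int :=
  match bins with
  | [] => binned
  | p :: rest =>
    let size0 := pvIntDivFloat100 (p * base)  -- int(percentage * base_num / 100)
    let size1 := pvWhileDec binned.sum size0 base
    let size2 := if idx = n then pvWhileInc binned.sum size1 base else size1
    pvALoop rest base (idx + 1) n (binned ++ [size2])

def int_to_bins_py (bins : List Int) (base_num : Int) : List Int :=
  pvALoop bins base_num 1 bins.length []

-- ===== PORT B =====
-- the `for percentage in bins[:-1]` loop: returns (result, total)
def pvBLoop (ps : List Int) (base total : Int) : List Int × Int :=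
  match ps with
  | [] => ([], total)
  | p :: rest =>
    let size := min (pvIntDivFloat100 (p * base)) (base - total)
    let (r, t) := pvBLoop rest base (total + size)
    (size :: r, t)

def int_to_bins_py_alt (bins : List Int) (base_num : Int) : List Int :=
  let rt := pvBLoop bins.dropLast base_num 0
  if bins.isEmpty then rt.1 else rt.1 ++ [base_num - rt.2]

-- ===== PRECONDITION & SPEC =====
def Spec_int_to_bins_py (bins : List Int) (base_num : Int) (out : List Int) : Prop := out = int_to_bins_py_alt bins base_num
instance (bins : List Int) (base_num : Int) (out : List Int) : Decidable (Spec_int_to_bins_py bins base_num out) := by unfold Spec_int_to_bins_py; infer_instance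

-- ===== CLAIM (what is proved, stated in full; the proofs are below) =====
def Claim_equal_int_to_bins_py : Prop := ∀ (bins : List Int) (base_num : Int), Dom_int_to_bins_py bins base_num → Spec_int_to_bins_py bins base_num (int_to_bins_py bins base_num)

-- ===== LEMMAS AND PROOFS =====

-- A's first while loop caps size at base - binSum.
theorem pvWhileDecGo_eq (fuel : Nat) (binSum size base : Int)
    (h : binSum + size - base ≤ fuel) :
    pvWhileDecGo fuel binSum size base = min size (base - binSum) := by
  induction fuel generalizing size with
  | zero => simp only [pvWhileDecGo]; omega
  | succ k ih =>
    simp only [pvWhileDecGo]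
    split_ifs with hc
    · rw [ih (size - 1) (by omega)]; omega
    · omega

theorem pvWhileDec_eq (binSum size base : Int) :
    pvWhileDec binSum size base = min size (base - binSum) :=
  pvWhileDecGo_eq _ binSum size base (by omega)

-- A's second while loop raises size to at least base - binSum.
theorem pvWhileIncGo_eq (fuel : Nat) (binSum size base : Int)
    (h : base - binSum - size ≤ fuel) :
    pvWhileIncGo fuel binSum size base = max size (base - binSum) := by
  induction fuel generalizing size with
  | zero => simp only [pvWhileIncGo]; omega
  | succ k ih =>
    simp only [pvWhileIncGo]
    split_ifs with hc
    · rw [ih (size + 1) (by omega)]; omega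
    · omega

theorem pvWhileInc_eq (binSum size base : Int) :
    pvWhileInc binSum size base = max size (base - binSum) :=
  pvWhileIncGo_eq _ binSum size base (by omega)

-- Main loop invariant: A's loop appends exactly B's bins[:-1] output plus the final fill-up,
-- provided idx is positioned so that `idx = n` fires exactly on the last element.
theorem pvALoop_eq (bins : List Int) (base idx n : Int) (binned : List Int)
    (hne : bins ≠ []) (hn : n = idx + bins.length - 1) :
    pvALoop bins base idx n binned =
      binned ++ ((pvBLoop bins.dropLast base binned.sum).1
        ++ [base - (pvBLoop bins.dropLast base binned.sum).2]) := by
  induction bins generalizing idx binned with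
  | nil => exact absurd rfl hne
  | cons p rest ih =>
    match rest, ih with
    | [], _ =>
      have hidx : idx = n := by simp at hn; omega
      simp [pvALoop, pvBLoop, hidx, pvWhileDec_eq, pvWhileInc_eq]
    | q :: rest', ih =>
      have hidx : ¬ idx = n := by simp at hn; omega
      have hdl : (p :: q :: rest').dropLast = p :: (q :: rest').dropLast := by simp
      rw [pvALoop, hdl, pvBLoop]
      simp only [if_neg hidx, pvWhileDec_eq]
      rw [ih (idx + 1) (binned ++ [min (pvIntDivFloat100 (p * base)) (base - binned.sum)])
        (by simp) (by simp at hn ⊢; omega)]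
      simp

-- ===== VERDICT (by name: the statement is the Claim_ definition above) =====
theorem int_to_bins_py_spec : Claim_equal_int_to_bins_py := by
  intro bins base_num _
  unfold Spec_int_to_bins_py int_to_bins_py int_to_bins_py_alt
  match bins with
  | [] => simp [pvALoop, pvBLoop]
  | p :: rest =>
    rw [pvALoop_eq (p :: rest) base_num 1 (p :: rest).length [] (by simp) (by simp)]
    simp
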